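-- pv_equiv track=rewrite | github.com/eliavw/mercs-v5 | src/mercs/utils/utils.py | code_to_query
-- ===== SOURCE A (Python) =====
-- def code_to_query(code, atts=None):
--     """
--     Change the code-array to an actual queries, which are three arrays.
--
--     :param code:                Array that contains:
--                                      0 for desc attribute
--                                      1 for target attribute
--                                     -1 for missing attribute
--     :param atts:                Array that contains the attributes (indices)
--     :return: Three arrays.      One for desc atts indices, one for targets,
--                                 one for missing
--     """
--
--     if atts is None:
--         atts = list(range(len(code)))
--     assert len(code) == len(atts)
--
--     desc = [x for i, x in enumerate(atts)
--             if code[i] == encode_attribute(x,[x],[])]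
--     targ = [x for i, x in enumerate(atts)
--             if code[i] == encode_attribute(x,[],[x])]
--     miss = [x for i, x in enumerate(atts)
--             if code[i] == encode_attribute(x, [], [])]
--     return desc, targ, miss
--
-- def encode_attribute(att, desc, targ):
--     """
--     Encode the 'role' of an attribute in a model.
--
--     `Role` means:
--         - Descriptive attribute (input)
--         - Target attribute (output)
--         - Missing attribute (not relevant to the model)
--     """
--
--     check_desc = att in desc
--     check_targ = att in targ
--
--     code_int = check_targ * 2 + check_desc - 1
--
--     return code_int
-- ===== SOURCE B (Python) =====
-- def code_to_query(code, atts=None):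
--     if atts is None:
--         atts = list(range(len(code)))
--     assert len(code) == len(atts)
--     desc, targ, miss = [], [], []
--     for c, x in zip(code, atts):
--         if c == 0:
--             desc.append(x)
--         elif c == 1:
--             targ.append(x)
--         elif c == -1:
--             miss.append(x)
--     return desc, targ, miss
-- ===== Notes on version B (the rewrite author's own statement) =====
-- stated objective: faster
-- what changed: Replaced three filtering comprehensions that each re-call the encode_attribute indirection per element with a single dispatching pass over zip(code, atts) appending each attribute to the right bucket.
import Mathlib
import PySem

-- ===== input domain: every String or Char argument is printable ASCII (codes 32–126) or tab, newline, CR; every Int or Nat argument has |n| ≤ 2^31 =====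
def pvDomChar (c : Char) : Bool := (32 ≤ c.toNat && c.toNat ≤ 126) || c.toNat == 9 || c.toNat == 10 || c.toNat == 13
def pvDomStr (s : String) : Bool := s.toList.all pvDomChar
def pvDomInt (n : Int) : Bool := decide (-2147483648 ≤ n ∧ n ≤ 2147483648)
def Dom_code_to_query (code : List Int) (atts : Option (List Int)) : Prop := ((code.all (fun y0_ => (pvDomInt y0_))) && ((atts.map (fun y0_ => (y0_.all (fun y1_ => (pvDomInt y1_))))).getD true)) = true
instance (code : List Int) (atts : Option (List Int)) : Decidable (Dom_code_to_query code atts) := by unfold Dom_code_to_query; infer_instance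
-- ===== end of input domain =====

-- B replaces A's three encode_attribute-driven filtering scans with one dispatch pass over zip(code, atts) (constant-factor faster).
-- A raises AssertionError when atts is given with a length different from code's; Pre_ excludes exactly those inputs.


-- ===== PORT A =====
-- encode_attribute: check_targ * 2 + check_desc - 1, with Python bools as ints
def encode_attribute (att : Int) (desc : List Int) (targ : List Int) : Int :=
  (if att ∈ targ then 1 else 0) * 2 + (if att ∈ desc then 1 else 0) - 1

def code_to_query (code : List Int) (atts : Option (List Int)) : List Int × List Int × List Int :=
  let attsL := match atts with
    | none => PySem.List.pyRange 0 (code.length : Int) 1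
    | some a => a
  -- assert len(code) == len(atts): Pre_ excludes the failing case
  let desc := (PySem.List.enumerate attsL 0).filterMap
    (fun p => if PySem.List.pyGetD code p.1 0 = encode_attribute p.2 [p.2] [] then some p.2 else none)
  let targ := (PySem.List.enumerate attsL 0).filterMap
    (fun p => if PySem.List.pyGetD code p.1 0 = encode_attribute p.2 [] [p.2] then some p.2 else none)
  let miss := (PySem.List.enumerate attsL 0).filterMap
    (fun p => if PySem.List.pyGetD code p.1 0 = encode_attribute p.2 [] [] then some p.2 else none)
  (desc, targ, miss)

-- ===== PORT B =====
def code_to_query_alt (code : List Int) (atts : Option (List Int)) : List Int × List Int × List Int :=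
  let attsL := match atts with
    | none => PySem.List.pyRange 0 (code.length : Int) 1
    | some a => a
  (code.zip attsL).foldl
    (fun (acc : List Int × List Int × List Int) cx =>
      if cx.1 = 0 then (acc.1 ++ [cx.2], acc.2.1, acc.2.2)
      else if cx.1 = 1 then (acc.1, acc.2.1 ++ [cx.2], acc.2.2)
      else if cx.1 = -1 then (acc.1, acc.2.1, acc.2.2 ++ [cx.2])
      else acc)
    ([], [], [])

-- ===== PRECONDITION & SPEC =====
-- Pre_ excludes exactly the inputs where A's `assert len(code) == len(atts)` raises AssertionError.
def Pre_code_to_query (code : List Int) (atts : Option (List Int)) : Prop :=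
  code.length = (atts.getD code).length
instance (code : List Int) (atts : Option (List Int)) : Decidable (Pre_code_to_query code atts) := by unfold Pre_code_to_query; infer_instance
def pvWitness_code_to_query : List Int × Option (List Int) := ([0, 1, -1, 2], some [10, 11, 12, 13])

def Spec_code_to_query (code : List Int) (atts : Option (List Int)) (out : List Int × List Int × List Int) : Prop := out = code_to_query_alt code atts
instance (code : List Int) (atts : Option (List Int)) (out : List Int × List Int × List Int) : Decidable (Spec_code_to_query code atts out) := by unfold Spec_code_to_query; infer_instance

-- ===== CLAIM (what is proved, stated in full; the proofs are below) =====
def Claim_equal_code_to_query : Prop := ∀ (code : List Int) (atts : Option (List Int)), Dom_code_to_query code atts → Pre_code_to_query code atts → Spec_code_to_query code atts (code_to_query code atts)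

-- ===== LEMMAS AND PROOFS =====

-- A's enumerate-and-index filter equals the zip-based filter, offset form.
theorem enum_filter_eq_zip (v : Int) (full : List Int) :
    ∀ (atts : List Int) (s : Nat), s + atts.length = full.length →
    (PySem.List.enumerate atts (s : Int)).filterMap
      (fun p => if PySem.List.pyGetD full p.1 0 = v then some p.2 else none)
    = ((full.drop s).zip atts).filterMap
      (fun p => if p.1 = v then some p.2 else none) := by
  intro atts
  induction atts with
  | nil => intro s h; simp [PySem.List.enumerate_nil]
  | cons x xs ih =>
    intro s h
    have hs : s < full.length := by simp at h; omega
    have hdrop : full.drop s = full[s] :: full.drop (s + 1) :=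
      List.drop_eq_getElem_cons hs
    have hget : PySem.List.pyGetD full (s : Int) 0 = full[s] := by
      rw [PySem.List.pyGetD_natCast]
      exact List.getD_eq_getElem full 0 hs
    have ihs := ih (s + 1) (by simp at h ⊢; omega)
    rw [PySem.List.enumerate_cons, hdrop]
    simp only [List.zip_cons_cons, List.filterMap_cons, hget]
    have hcast : ((s : Int) + 1) = ((s + 1 : Nat) : Int) := by push_cast; ring
    rw [hcast, ihs]

-- B's fold with three accumulators, characterised by three zip-based filters.
theorem fold_buckets (ps : List (Int × Int)) :
    ∀ (d t m : List Int),
    ps.foldl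
      (fun (acc : List Int × List Int × List Int) cx =>
        if cx.1 = 0 then (acc.1 ++ [cx.2], acc.2.1, acc.2.2)
        else if cx.1 = 1 then (acc.1, acc.2.1 ++ [cx.2], acc.2.2)
        else if cx.1 = -1 then (acc.1, acc.2.1, acc.2.2 ++ [cx.2])
        else acc)
      (d, t, m)
    = (d ++ ps.filterMap (fun p => if p.1 = 0 then some p.2 else none),
       t ++ ps.filterMap (fun p => if p.1 = 1 then some p.2 else none),
       m ++ ps.filterMap (fun p => if p.1 = -1 then some p.2 else none)) := by
  induction ps with
  | nil => intro d t m; simp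
  | cons q qs ih =>
    intro d t m
    simp only [List.foldl_cons, List.filterMap_cons]
    by_cases h0 : q.1 = 0
    · simp [h0, ih]
    · by_cases h1 : q.1 = 1
      · simp [h0, h1, ih]
      · by_cases h2 : q.1 = -1
        · simp [h2, ih]
        · simp [h0, h1, h2, ih]

theorem encode_desc (x : Int) : encode_attribute x [x] [] = 0 := by
  simp [encode_attribute]
theorem encode_targ (x : Int) : encode_attribute x [] [x] = 1 := by
  simp [encode_attribute]
theorem encode_miss (x : Int) : encode_attribute x [] [] = -1 := by
  simp [encode_attribute]

theorem main_eq (code : List Int) (attsL : List Int) (h : code.length = attsL.length) :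
    ((PySem.List.enumerate attsL 0).filterMap
        (fun p => if PySem.List.pyGetD code p.1 0 = encode_attribute p.2 [p.2] [] then some p.2 else none),
     (PySem.List.enumerate attsL 0).filterMap
        (fun p => if PySem.List.pyGetD code p.1 0 = encode_attribute p.2 [] [p.2] then some p.2 else none),
     (PySem.List.enumerate attsL 0).filterMap
        (fun p => if PySem.List.pyGetD code p.1 0 = encode_attribute p.2 [] [] then some p.2 else none))
    = (code.zip attsL).foldl
        (fun (acc : List Int × List Int × List Int) cx =>
          if cx.1 = 0 then (acc.1 ++ [cx.2], acc.2.1, acc.2.2)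
          else if cx.1 = 1 then (acc.1, acc.2.1 ++ [cx.2], acc.2.2)
          else if cx.1 = -1 then (acc.1, acc.2.1, acc.2.2 ++ [cx.2])
          else acc)
        ([], [], []) := by
  rw [fold_buckets]
  simp only [List.nil_append]
  refine Prod.ext ?_ (Prod.ext ?_ ?_)
  · simp only [encode_desc]
    have := enum_filter_eq_zip 0 code attsL 0 (by omega)
    simpa using this
  · simp only [encode_targ]
    have := enum_filter_eq_zip 1 code attsL 0 (by omega)
    simpa using this
  · simp only [encode_miss]
    have := enum_filter_eq_zip (-1) code attsL 0 (by omega)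
    simpa using this

-- ===== VERDICT (by name: the statement is the Claim_ definition above) =====
theorem code_to_query_spec : Claim_equal_code_to_query := by
  intro code atts _ hpre
  unfold Spec_code_to_query code_to_query code_to_query_alt
  cases atts with
  | none =>
    exact main_eq code _ (by simp [PySem.List.length_pyRange_one])
  | some a =>
    exact main_eq code a (by simpa [Pre_code_to_query] using hpre)
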